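-- pv_equiv track=rewrite | github.com/Zeeeratul/computorv1 | parsing.py | splitInMonomials
-- ===== SOURCE A (Python) =====
-- def splitInMonomials(polynomial):
--     monomialsList = []
--     startIndex = 0
--     index = 0
--
--     while index < len(polynomial):
--
--         if (polynomial[index] == "-" or polynomial[index] == "+") and index != startIndex:
--             monomialsList.append(polynomial[startIndex : index].replace(" ", ""))
--             startIndex = index
--         index += 1
--
--     monomialsList.append(polynomial[startIndex : index].replace(" ", ""))
--
--     return monomialsList
-- ===== SOURCE B (Python) =====
-- def splitInMonomials(polynomial):
--     starts = [0] + [i for i, c in enumerate(polynomial) if i > 0 and (c == "+" or c == "-")]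
--     ends = starts[1:] + [len(polynomial)]
--     return [polynomial[s:e].replace(" ", "") for s, e in zip(starts, ends)]
-- ===== Notes on version B (the rewrite author's own statement) =====
-- stated objective: alternative
-- what changed: Replaced A's single stateful char-by-char scan (startIndex/index with append-inside-loop) by a two-phase decomposition: first build the table of monomial start indices (0 plus every interior '+'/'-' position) with one comprehension, then slice between consecutive starts and strip spaces; the C-level comprehension/zip passes give a constant-factor speedup over A's interpreted while loop.
import Mathlib
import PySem

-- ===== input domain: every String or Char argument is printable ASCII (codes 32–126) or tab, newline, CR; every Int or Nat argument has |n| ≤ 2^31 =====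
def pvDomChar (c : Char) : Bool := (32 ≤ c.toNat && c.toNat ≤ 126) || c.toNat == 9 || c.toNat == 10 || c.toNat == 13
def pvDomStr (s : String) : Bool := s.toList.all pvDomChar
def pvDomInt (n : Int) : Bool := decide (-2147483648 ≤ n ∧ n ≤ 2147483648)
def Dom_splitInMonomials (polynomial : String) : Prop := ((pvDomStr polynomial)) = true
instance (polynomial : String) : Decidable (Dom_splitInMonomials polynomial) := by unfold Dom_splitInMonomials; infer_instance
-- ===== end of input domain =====

-- B replaces A's stateful scan by a two-phase decomposition (boundary-index table, then slices between consecutive starts); objective: alternative decomposition, same cost.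

-- ===== PORT A =====
-- literal port of A's while loop: index/startIndex state, append a stripped slice at each interior sign
def splitInMonomials_go (polynomial : String) (acc : List String) (startIndex index : Nat) : List String :=
  if _h : (index : Int) < PySem.Str.len polynomial then
    if (PySem.Str.pyGet? polynomial (index : Int) = some '-' ∨ PySem.Str.pyGet? polynomial (index : Int) = some '+') ∧ index ≠ startIndex then
      splitInMonomials_go polynomial (acc ++ [PySem.Str.replace (PySem.Str.slice polynomial (some (startIndex : Int)) (some (index : Int))) " " ""]) index (index + 1)
    else
      splitInMonomials_go polynomial acc startIndex (index + 1)
  else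
    acc ++ [PySem.Str.replace (PySem.Str.slice polynomial (some (startIndex : Int)) (some (index : Int))) " " ""]
termination_by (PySem.Str.len polynomial).toNat - index
decreasing_by all_goals (simp only [PySem.Str.len_eq] at _h ⊢; omega)

def splitInMonomials (polynomial : String) : List String :=
  splitInMonomials_go polynomial [] 0 0

-- ===== PORT B =====
-- port of Source B: starts table (0 plus interior sign positions), ends = shifted starts ++ [len], slice each pair
def splitInMonomials_alt (polynomial : String) : List String :=
  let starts : List Nat :=
    0 :: ((polynomial.toList.zipIdx 0).filter (fun p => decide (0 < p.2) && (p.1 == '+' || p.1 == '-'))).map Prod.snd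
  let ends : List Nat := starts.drop 1 ++ [(PySem.Str.len polynomial).toNat]
  (starts.zip ends).map (fun p => PySem.Str.replace (PySem.Str.slice polynomial (some (p.1 : Int)) (some (p.2 : Int))) " " "")

-- ===== PRECONDITION & SPEC =====
def Spec_splitInMonomials (polynomial : String) (out : List String) : Prop := out = splitInMonomials_alt polynomial
instance (polynomial : String) (out : List String) : Decidable (Spec_splitInMonomials polynomial out) := by unfold Spec_splitInMonomials; infer_instance

-- ===== CLAIM (what is proved, stated in full; the proofs are below) =====
def Claim_equal_splitInMonomials : Prop := ∀ (polynomial : String), Dom_splitInMonomials polynomial → Spec_splitInMonomials polynomial (splitInMonomials polynomial)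

-- ===== LEMMAS AND PROOFS =====

-- one stripped slice polynomial[a:b].replace(" ","")
def pvPiece (s : String) (a b : Nat) : String :=
  PySem.Str.replace (PySem.Str.slice s (some (a : Int)) (some (b : Int))) " " ""

-- the slices between consecutive entries of a start-index table (last end = len)
def pvMapSl (s : String) (starts : List Nat) : List String :=
  (starts.zip (starts.drop 1 ++ [(PySem.Str.len s).toNat])).map (fun p => pvPiece s p.1 p.2)

-- positions k, k+1, … of the chars of cs that are signs at positive index
def pvSgnIdx : List Char → Nat → List Nat
  | [], _ => []
  | c :: rest, k => (if 0 < k ∧ (c = '-' ∨ c = '+') then [k] else []) ++ pvSgnIdx rest (k + 1)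

lemma pvFilter_eq_sgnIdx (cs : List Char) (k : Nat) :
    ((cs.zipIdx k).filter (fun p => decide (0 < p.2) && (p.1 == '+' || p.1 == '-'))).map Prod.snd
      = pvSgnIdx cs k := by
  induction cs generalizing k with
  | nil => simp [pvSgnIdx]
  | cons c rest ih =>
    rw [List.zipIdx_cons, List.filter_cons]
    by_cases hp : 0 < k ∧ (c = '-' ∨ c = '+')
    · have hb : (decide (0 < k) && (c == '+' || c == '-')) = true := by
        rcases hp.2 with h | h <;> simp [hp.1, h]
      rcases hp.2 with h | h <;> subst h <;> simp [hp.1, pvSgnIdx, ih]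
    · have hb : (decide (0 < k) && (c == '+' || c == '-')) = false := by
        rcases Decidable.em (0 < k) with hk | hk
        · rcases Decidable.em (c = '-') with h | h
          · exact absurd ⟨hk, Or.inl h⟩ hp
          · rcases Decidable.em (c = '+') with h' | h'
            · exact absurd ⟨hk, Or.inr h'⟩ hp
            · simp [h, h']
        · simp [hk]
      simp [hb, hp, pvSgnIdx, ih]

lemma pvAlt_eq (s : String) :
    splitInMonomials_alt s = pvMapSl s (0 :: pvSgnIdx s.toList 0) := by
  simp only [splitInMonomials_alt, pvMapSl, pvFilter_eq_sgnIdx, pvPiece]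

lemma pvGo_eq (s : String) :
    ∀ (n start index : Nat) (acc : List String),
      s.toList.length - index = n → start ≤ index → index ≤ s.toList.length →
      (start = index → index = 0) →
      splitInMonomials_go s acc start index
        = acc ++ pvMapSl s (start :: pvSgnIdx (s.toList.drop index) index) := by
  intro n
  induction n with
  | zero =>
    intro start index acc hn h1 h2 h3
    have hlen : index = s.toList.length := by omega
    rw [splitInMonomials_go.eq_def]
    have hnotlt : ¬ ((index : Int) < PySem.Str.len s) := by
      simp [PySem.Str.len_eq, hlen]
    rw [dif_neg hnotlt]
    have hd : s.toList.drop index = ([] : List Char) := by rw [hlen]; exact List.drop_length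
    rw [hd]
    simp [pvMapSl, pvPiece, pvSgnIdx, PySem.Str.len_eq, hlen]
  | succ n ih =>
    intro start index acc hn h1 h2 h3
    have hlt : index < s.toList.length := by omega
    have hdrop : s.toList.drop index = s.toList[index] :: s.toList.drop (index + 1) :=
      List.drop_eq_getElem_cons hlt
    have hget : PySem.Str.pyGet? s (index : Int) = some s.toList[index] := by
      simp [List.getElem?_eq_getElem hlt]
    rw [splitInMonomials_go.eq_def]
    have hlen' : (index : Int) < PySem.Str.len s := by
      simp [PySem.Str.len_eq]; exact_mod_cast hlt
    rw [dif_pos hlen']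
    by_cases hsign : s.toList[index] = '-' ∨ s.toList[index] = '+'
    · by_cases hne : index = start
      · -- sign at index but index = startIndex: only possible at index = 0; no split
        have h0 : index = 0 := h3 hne.symm
        rw [if_neg (by simp [hne])]
        rw [ih start (index + 1) acc (by omega) (by omega) (by omega) (by omega)]
        rw [hdrop]
        simp [pvSgnIdx, h0]
      · have hcond : (PySem.Str.pyGet? s (index : Int) = some '-' ∨ PySem.Str.pyGet? s (index : Int) = some '+') ∧ index ≠ start := by
          refine ⟨?_, hne⟩
          rcases hsign with h | h
          · exact Or.inl (by rw [hget, h])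
          · exact Or.inr (by rw [hget, h])
        rw [if_pos hcond]
        rw [ih index (index + 1) _ (by omega) (by omega) (by omega) (by omega)]
        have hpos : 0 < index := by omega
        rw [hdrop]
        simp only [pvSgnIdx, if_pos (And.intro hpos hsign)]
        simp [pvMapSl, pvPiece, List.append_assoc]
    · have hcond : ¬ ((PySem.Str.pyGet? s (index : Int) = some '-' ∨ PySem.Str.pyGet? s (index : Int) = some '+') ∧ index ≠ start) := by
        rw [hget]
        rintro ⟨h | h, -⟩
        · exact hsign (Or.inl (Option.some.inj h))
        · exact hsign (Or.inr (Option.some.inj h))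
      rw [if_neg hcond]
      rw [ih start (index + 1) acc (by omega) (by omega) (by omega) (by omega)]
      rw [hdrop]
      simp [pvSgnIdx, hsign]

-- ===== VERDICT (by name: the statement is the Claim_ definition above) =====
theorem splitInMonomials_spec : Claim_equal_splitInMonomials := by
  intro s _
  unfold Spec_splitInMonomials splitInMonomials
  rw [pvGo_eq s s.toList.length 0 0 [] (by omega) (le_refl 0) (by omega) (fun _ => rfl)]
  rw [pvAlt_eq]
  simp
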